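-- pv_equiv track=rewrite | github.com/pasztor/sshfdpass | lib/sshfdpass/common/__init__.py | argparse
-- ===== SOURCE A (Python) =====
-- def argparse(arg, rules):
--     ret = ''
--     status = 0
--     if isinstance(arg, str):
--         for i in arg:
--             if status == 0:
--                 if i == '%':
--                     status = 1
--                 else:
--                     ret += i
--             else:
--                 status = 0
--                 ret += rules.get(i,i)
--         return ret
--     raise(sshfdpassException)
-- ===== SOURCE B (Python) =====
-- def argparse(arg, rules):
--     if not isinstance(arg, str):
--         raise Exception("sshfdpassException")
--     # Stage 1: split once on '%'; stage 2: each later piece starts where an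
--     # escape was -- its first char is the escaped char (an empty piece means
--     # the escaped char was '%' itself, consuming the next piece verbatim).
--     parts = arg.split('%')
--     out = [parts[0]]
--     j = 1
--     while j < len(parts):
--         p = parts[j]
--         if p:
--             out.append(rules.get(p[0], p[0]) + p[1:])
--             j += 1
--         elif j + 1 < len(parts):
--             out.append(rules.get('%', '%'))
--             out.append(parts[j + 1])
--             j += 2
--         else:
--             j += 1  # trailing '%' is dropped
--     return ''.join(out)
-- ===== Notes on version B (the rewrite author's own statement) =====
-- stated objective: alternative
-- what changed: Replaces the per-character status-flag state machine with two stages: split the string once on '%', then rewrite each later piece (its first character is the escaped one; an empty piece means an escaped '%', taking the next piece verbatim) and join.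
import Mathlib
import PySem

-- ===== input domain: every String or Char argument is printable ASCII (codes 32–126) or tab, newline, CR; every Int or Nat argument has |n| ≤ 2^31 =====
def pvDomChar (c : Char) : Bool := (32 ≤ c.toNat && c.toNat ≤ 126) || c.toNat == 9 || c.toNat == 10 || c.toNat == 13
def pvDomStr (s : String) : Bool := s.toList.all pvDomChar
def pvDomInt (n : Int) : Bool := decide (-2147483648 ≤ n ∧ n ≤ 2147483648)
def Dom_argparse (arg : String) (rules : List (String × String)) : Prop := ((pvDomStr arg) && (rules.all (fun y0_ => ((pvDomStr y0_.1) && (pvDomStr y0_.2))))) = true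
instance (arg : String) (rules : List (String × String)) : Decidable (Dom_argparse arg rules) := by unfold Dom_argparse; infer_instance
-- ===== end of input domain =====

-- B replaces A's per-character status-flag state machine by two stages: split the
-- string once on '%', then rewrite the later pieces (whose first char is the escaped
-- char) and join. Same result; alternative decomposition, no speed claim.

-- ===== PORT A =====
-- rules.get(i, i) on the association list (first match, default = the char itself)
def pvGetRule (rules : List (String × String)) (c : Char) : String :=
  (rules.lookup (String.mk [c])).getD (String.mk [c])

-- the loop body of A: state = (ret, status)
def pvAStep (rules : List (String × String)) (st : String × Int) (i : Char) : String × Int :=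
  if st.2 == 0 then
    if i == '%' then (st.1, 1) else (st.1 ++ String.mk [i], 0)
  else
    (st.1 ++ pvGetRule rules i, 0)

def argparse (arg : String) (rules : List (String × String)) : String :=
  (arg.toList.foldl (pvAStep rules) ("", 0)).1

-- ===== PORT B =====
-- B's while loop over parts[1:]: a nonempty piece contributes rules.get(p[0],p[0]) + p[1:];
-- an empty piece means the escaped char was '%' (next piece taken verbatim, skip 2);
-- a final empty piece is a trailing '%', dropped.
def pvBPieces (rules : List (String × String)) : List (List Char) → List String
  | [] => []
  | [] :: [] => []
  | [] :: q :: rest => pvGetRule rules '%' :: String.mk q :: pvBPieces rules rest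
  | (c :: cs) :: rest => (pvGetRule rules c ++ String.mk cs) :: pvBPieces rules rest

-- arg.split('%') ported as List.splitOn '%' on the char list (keeps empty pieces, like Python)
def argparse_alt (arg : String) (rules : List (String × String)) : String :=
  match arg.toList.splitOn '%' with
  | [] => ""  -- unreachable: splitOn never returns []
  | p :: ps => String.join (String.mk p :: pvBPieces rules ps)

-- ===== PRECONDITION & SPEC =====
def Spec_argparse (arg : String) (rules : List (String × String)) (out : String) : Prop := out = argparse_alt arg rules
instance (arg : String) (rules : List (String × String)) (out : String) : Decidable (Spec_argparse arg rules out) := by unfold Spec_argparse; infer_instance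

-- ===== CLAIM (what is proved, stated in full; the proofs are below) =====
def Claim_equal_argparse : Prop := ∀ (arg : String) (rules : List (String × String)), Dom_argparse arg rules → Spec_argparse arg rules (argparse arg rules)

-- ===== LEMMAS AND PROOFS =====

-- proof-side reference function: the one-pass lookahead recursion both ports equal
def pvSpecF (rules : List (String × String)) : List Char → String
  | [] => ""
  | ['%'] => ""
  | '%' :: c :: rest => pvGetRule rules c ++ pvSpecF rules rest
  | c :: rest => String.mk [c] ++ pvSpecF rules rest

theorem foldl_aStep_eq (rules : List (String × String)) :
    ∀ (l : List Char) (ret : String),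
      (List.foldl (pvAStep rules) (ret, 0) l).1 = ret ++ pvSpecF rules l := by
  intro l
  induction l using pvSpecF.induct with
  | case1 => intro ret; simp [pvSpecF]
  | case2 => intro ret; simp [pvSpecF, pvAStep]
  | case3 c rest ih =>
      intro ret
      simp only [List.foldl, pvAStep, pvSpecF]
      simp [ih, String.append_assoc]
  | case4 c rest h1 h2 ih =>
      intro ret
      have hc : c ≠ '%' := by
        intro h; subst h
        cases rest with
        | nil => simp_all
        | cons d r => exact h2 d r rfl rfl
      simp only [List.foldl, pvAStep, pvSpecF]
      simp [hc, ih, String.append_assoc]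

theorem pvMk_nil : String.mk ([] : List Char) = "" := rfl

theorem pvMk_cons (c : Char) (p : List Char) :
    String.mk (c :: p) = String.mk [c] ++ String.mk p := by
  show String.ofList ([c] ++ p) = String.ofList [c] ++ String.ofList p
  exact String.ofList_append ..

theorem pvFoldl_append (a b : String) (l : List String) :
    l.foldl (fun r s => r ++ s) (a ++ b) = a ++ l.foldl (fun r s => r ++ s) b := by
  induction l generalizing b with
  | nil => simp
  | cons x t ih => simp [List.foldl, String.append_assoc, ih]

-- B's staged computation equals the reference recursion
theorem bSplit_eq (rules : List (String × String)) :
    ∀ (l : List Char),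
      (match l.splitOn '%' with
       | [] => ""
       | p :: ps => String.join (String.mk p :: pvBPieces rules ps)) = pvSpecF rules l := by
  intro l
  induction l using pvSpecF.induct with
  | case1 => simp [List.splitOn_nil, pvBPieces, pvSpecF, String.join, pvMk_nil]
  | case2 =>
      simp [List.splitOn, List.splitOnP_cons, List.splitOnP_nil, pvBPieces, pvSpecF, String.join,
        pvMk_nil]
  | case3 c rest ih =>
      by_cases hc : c = '%'
      · subst hc
        cases hsp : rest.splitOn '%' with
        | nil => exact absurd hsp (List.splitOnP_ne_nil _ _)
        | cons p ps =>
            simp only [List.splitOn, List.splitOnP_cons] at hsp ⊢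
            simp only [hsp, beq_self_eq_true, if_true, pvBPieces, pvSpecF, String.join]
            rw [← ih]
            simp [List.splitOn, hsp, String.join, pvFoldl_append, pvMk_nil]
      · cases hsp : rest.splitOn '%' with
        | nil => exact absurd hsp (List.splitOnP_ne_nil _ _)
        | cons p ps =>
            simp only [List.splitOn, List.splitOnP_cons] at hsp ⊢
            simp only [hsp, beq_self_eq_true, if_true, beq_iff_eq, hc, if_false,
              List.modifyHead, pvBPieces, pvSpecF, String.join]
            rw [← ih]
            simp [List.splitOn, hsp, String.join, pvFoldl_append, pvMk_nil]
  | case4 c rest h1 h2 ih =>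
      have hc : c ≠ '%' := by
        intro h; subst h
        cases rest with
        | nil => simp_all
        | cons d r => exact h2 d r rfl rfl
      cases hsp : rest.splitOn '%' with
      | nil => exact absurd hsp (List.splitOnP_ne_nil _ _)
      | cons p ps =>
          simp only [List.splitOn, List.splitOnP_cons] at hsp ⊢
          simp only [hsp, beq_iff_eq, hc, if_false, List.modifyHead, pvSpecF]
          rw [← ih]
          simp [List.splitOn, hsp, String.join]
          rw [pvMk_cons, pvFoldl_append]

-- ===== VERDICT (by name: the statement is the Claim_ definition above) =====
theorem argparse_spec : Claim_equal_argparse := by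
  intro arg rules _
  unfold Spec_argparse argparse argparse_alt
  rw [bSplit_eq rules arg.toList]
  simpa using foldl_aStep_eq rules arg.toList ""
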